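-- pv_equiv track=rewrite | github.com/andy0013/tp2guarna | procesa_archivos_entrada.py | obtiene_lista_palabras_validas
-- ===== SOURCE A (Python) =====
-- def remueve_valores_de_lista(lista, val):
--         """remueve valores pasados por parametro de una lista"""
--         while val in lista:
--             lista.remove(val)
--
-- def obtiene_lista_palabras_validas(oracion):
--     """Esta funcion genera palabras validas funciona como complementos del archivo reemplazo.csv, ya que no hay que
--     reemplazar nada"""
--
--     t = ""
--     parametro = "ªº\_!?¡¿#*=<>;0123456789!?/\[]{}().,:\-\"\''"
--     for registro in oracion:
--         for c in registro:
--             if not c in parametro: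
--                 t += c
--             else:
--                  t +=' '
--     t=t.upper()
--     lista = t.split(" ")
--     remueve_valores_de_lista(lista,"")
--     return lista
-- ===== SOURCE B (Python) =====
-- def obtiene_lista_palabras_validas(oracion):
--     """Single pass: accumulate each word directly (uppercasing char by char) and
--     flush it into the result at separators; no join/upper/split/remove passes."""
--     parametro = "ªº\_!?¡¿#*=<>;0123456789!?/\[]{}().,:\-\"\''"
--     resultado = []
--     palabra = ""
--     for registro in oracion:
--         for c in registro:
--             if c not in parametro and c != ' ':
--                 palabra += c.upper()
--             else:
--                 if palabra:
--                     resultado.append(palabra)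
--                     palabra = ""
--     if palabra:
--         resultado.append(palabra)
--     return resultado
-- ===== Notes on version B (the rewrite author's own statement) =====
-- stated objective: simpler
-- what changed: Replaces A's four-pass pipeline (build a separator-replaced string, uppercase it, split on spaces, repeatedly remove empty tokens) by a single pass that accumulates the current word char by char (uppercased) and flushes nonempty words into the result at separators, eliminating the join-string, split and the remueve_valores_de_lista helper.
import Mathlib
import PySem

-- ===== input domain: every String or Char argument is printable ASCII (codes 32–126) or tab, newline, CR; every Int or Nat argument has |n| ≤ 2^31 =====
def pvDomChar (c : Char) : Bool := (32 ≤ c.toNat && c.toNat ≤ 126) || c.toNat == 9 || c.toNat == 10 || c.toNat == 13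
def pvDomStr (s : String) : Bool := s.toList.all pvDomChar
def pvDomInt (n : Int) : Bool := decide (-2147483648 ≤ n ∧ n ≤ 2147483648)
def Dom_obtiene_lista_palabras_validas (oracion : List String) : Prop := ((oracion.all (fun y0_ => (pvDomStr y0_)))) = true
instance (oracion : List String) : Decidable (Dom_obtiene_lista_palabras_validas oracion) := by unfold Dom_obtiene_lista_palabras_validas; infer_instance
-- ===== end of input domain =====

-- B builds the token list in one pass (accumulate the current word, uppercased char by char,
-- and flush it at separators) instead of A's build-string / upper / split / remove-empties
-- pipeline; objective: simpler.  (A mutates only its local list `lista`; nothing caller-visible.)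

-- ===== PORT A =====
-- the Python literal "ªº\_!?¡¿#*=<>;0123456789!?/\[]{}().,:\-\"\''" (its backslash escapes are literal backslashes)
def pvParametro : List Char := "ªº\\_!?¡¿#*=<>;0123456789!?/\\[]{}().,:\\-\"''".toList

-- while val in lista: lista.remove(val)   (returns the mutated local list)
def remueve_valores_de_lista (lista : List String) (val : String) : List String :=
  match h : PySem.List.remove? lista val with
  | some l' => remueve_valores_de_lista l' val
  | none => lista
termination_by lista.length
decreasing_by
  have hv : val ∈ lista := by
    by_contra hv
    rw [(PySem.List.remove?_eq_none_iff lista val).mpr hv] at h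
    simp at h
  rw [PySem.List.remove?_eq_some_erase lista val hv] at h
  injection h with h2
  rw [← h2]
  rw [List.length_erase_of_mem hv]
  exact Nat.pred_lt (by simpa using (List.length_pos_of_mem hv).ne')

def obtiene_lista_palabras_validas (oracion : List String) : List String :=
  let t : List Char :=
    oracion.foldl (fun t registro =>
      registro.toList.foldl (fun t c =>
        if ¬ PySem.Chars.isIn [c] pvParametro then t ++ [c] else t ++ [' ']) t) []
  let t := PySem.Chars.upper t
  let lista := (PySem.Chars.splitOn t [' ']).map String.ofList
  remueve_valores_de_lista lista ""

-- ===== PORT B =====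
def pvStepB (st : List String × List Char) (c : Char) : List String × List Char :=
  if ¬ PySem.Chars.isIn [c] pvParametro ∧ c ≠ ' ' then
    (st.1, st.2 ++ PySem.Chars.upper [c])
  else
    if st.2 ≠ [] then (st.1 ++ [String.ofList st.2], []) else st

def obtiene_lista_palabras_validas_alt (oracion : List String) : List String :=
  let st := oracion.foldl (fun st registro => registro.toList.foldl pvStepB st) ([], [])
  if st.2 ≠ [] then st.1 ++ [String.ofList st.2] else st.1

-- ===== PRECONDITION & SPEC =====
def Spec_obtiene_lista_palabras_validas (oracion : List String) (out : List String) : Prop := out = obtiene_lista_palabras_validas_alt oracion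
instance (oracion : List String) (out : List String) : Decidable (Spec_obtiene_lista_palabras_validas oracion out) := by unfold Spec_obtiene_lista_palabras_validas; infer_instance

-- ===== CLAIM (what is proved, stated in full; the proofs are below) =====
def Claim_equal_obtiene_lista_palabras_validas : Prop := ∀ (oracion : List String), Dom_obtiene_lista_palabras_validas oracion → Spec_obtiene_lista_palabras_validas oracion (obtiene_lista_palabras_validas oracion)

-- ===== LEMMAS AND PROOFS =====

-- the character each input char contributes to A's uppercased string t
def pvG (c : Char) : Char := if pvParametro.contains c then ' ' else PySem.Chars.upperChar c

-- reference splitter on ' ' (proof-side spec of Chars.splitOn · [' '])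
def pvSp : List Char → List (List Char)
  | [] => [[]]
  | c :: rest =>
    if c = ' ' then [] :: pvSp rest
    else match pvSp rest with
      | t :: ts => (c :: t) :: ts
      | [] => [[c]]

theorem pvSp_ne_nil (l : List Char) : pvSp l ≠ [] := by
  cases l with
  | nil => simp [pvSp]
  | cons c rest =>
    simp only [pvSp]
    split
    · simp
    · split <;> simp

theorem pvIsIn_singleton (c : Char) (s : List Char) :
    PySem.Chars.isIn [c] s = s.contains c := by
  by_cases h : c ∈ s
  · simp [PySem.Chars.isIn_iff_infix, (List.singleton_infix_iff c s).mpr h, h]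
  · have hni : ¬ ([c] <:+: s) := fun hc => h ((List.singleton_infix_iff c s).mp hc)
    simp only [List.contains_eq_mem, h, decide_false]
    rw [← Bool.not_eq_true, PySem.Chars.isIn_iff_infix]
    exact hni

theorem pvOfNat_toNat (n : Nat) (h : n < 55296) : (Char.ofNat n).toNat = n := by
  rw [Char.ofNat, dif_pos (Or.inl h : Nat.isValidChar n)]; exact Char.toNat_ofNatAux _

theorem pvUpperChar_ne_space (c : Char) (h : c ≠ ' ') : PySem.Chars.upperChar c ≠ ' ' := by
  unfold PySem.Chars.upperChar PySem.Chars.islower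
  split
  · rename_i hl
    simp only [Bool.and_eq_true, decide_eq_true_eq, Char.le_def, UInt32.le_iff_toNat_le] at hl
    have h1 : 97 ≤ c.toNat := hl.1
    have h2 : c.toNat ≤ 122 := hl.2
    intro he
    have h3 := congrArg Char.toNat he
    rw [pvOfNat_toNat _ (by omega)] at h3
    have h4 : (' ').toNat = 32 := rfl
    omega
  · exact h

-- double loop over the sentence = single fold over the flattened character list
theorem pvFoldFlat {σ : Type} (step : σ → Char → σ) (oracion : List String) (init : σ) :
    oracion.foldl (fun s registro => registro.toList.foldl step s) init
      = (oracion.flatMap (·.toList)).foldl step init := by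
  induction oracion generalizing init with
  | nil => rfl
  | cons r rs ih => simp [List.flatMap_cons, List.foldl_append, ih]

-- A's inner accumulation is a map
theorem pvAfold_map (cs : List Char) (t0 : List Char) :
    cs.foldl (fun t c =>
        if ¬ PySem.Chars.isIn [c] pvParametro then t ++ [c] else t ++ [' ']) t0
      = t0 ++ cs.map (fun c => if pvParametro.contains c then ' ' else c) := by
  induction cs generalizing t0 with
  | nil => simp
  | cons c cs ih =>
    rw [List.foldl_cons, List.map_cons, ih]
    by_cases hmem : pvParametro.contains c = true
    · rw [if_neg (by rw [pvIsIn_singleton]; exact not_not_intro hmem), if_pos hmem]; simp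
    · rw [if_pos (by rw [pvIsIn_singleton]; exact hmem), if_neg hmem]; simp

theorem pvG_comp (c : Char) :
    PySem.Chars.upperChar (if pvParametro.contains c then ' ' else c) = pvG c := by
  unfold pvG
  by_cases h : pvParametro.contains c = true
  · rw [if_pos h, if_pos h]; decide
  · rw [if_neg h, if_neg h]

-- splitOn.go on [' '] computes pvSp
theorem pvGo_spec (l : List Char) : ∀ (fuel : Nat) (cur : List Char) (acc : List (List Char)),
    l.length ≤ fuel →
    PySem.Chars.splitOn.go [' '] fuel l cur acc
      = acc.reverse ++ (match pvSp l with
          | t :: ts => (cur.reverse ++ t) :: ts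
          | [] => [cur.reverse]) := by
  induction l with
  | nil =>
    intro fuel cur acc _
    cases fuel <;> simp [PySem.Chars.splitOn.go, pvSp]
  | cons c rest ih =>
    intro fuel cur acc hf
    cases fuel with
    | zero => simp at hf
    | succ f =>
      have hf' : rest.length ≤ f := by simpa using hf
      by_cases hc : c = ' '
      · subst hc
        rw [show PySem.Chars.splitOn.go [' '] (f + 1) (' ' :: rest) cur acc
              = PySem.Chars.splitOn.go [' '] f rest [] (cur.reverse :: acc) by
            simp [PySem.Chars.splitOn.go, List.isPrefixOf]]
        rw [ih f [] (cur.reverse :: acc) hf']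
        rcases hsp : pvSp rest with _ | ⟨t, ts⟩
        · exact absurd hsp (pvSp_ne_nil rest)
        · simp [pvSp, hsp]
      · rw [show PySem.Chars.splitOn.go [' '] (f + 1) (c :: rest) cur acc
              = PySem.Chars.splitOn.go [' '] f rest (c :: cur) acc by
            simp [PySem.Chars.splitOn.go, List.isPrefixOf, Ne.symm hc]]
        rw [ih f (c :: cur) acc hf']
        rcases hsp : pvSp rest with _ | ⟨t, ts⟩
        · exact absurd hsp (pvSp_ne_nil rest)
        · simp [pvSp, hc, hsp]

theorem pvSplitOn_eq_sp (l : List Char) :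
    PySem.Chars.splitOn l [' '] = pvSp l := by
  rw [PySem.Chars.splitOn, pvGo_spec l (l.length + 1) [] [] (by omega)]
  rcases hsp : pvSp l with _ | ⟨t, ts⟩
  · exact absurd hsp (pvSp_ne_nil l)
  · simp

theorem pvSp_no_space (l : List Char) (h : ' ' ∉ l) : pvSp l = [l] := by
  induction l with
  | nil => rfl
  | cons c rest ih =>
    have hc : c ≠ ' ' := fun he => h (he ▸ List.mem_cons_self)
    have hr := ih (fun hm => h (List.mem_cons_of_mem c hm))
    simp [pvSp, hc, hr]

theorem pvSp_append_space (pal rest : List Char) (h : ' ' ∉ pal) :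
    pvSp (pal ++ ' ' :: rest) = pal :: pvSp rest := by
  induction pal with
  | nil => simp [pvSp]
  | cons c p ih =>
    have hc : c ≠ ' ' := fun he => h (he ▸ List.mem_cons_self)
    have hr := ih (fun hm => h (List.mem_cons_of_mem c hm))
    simp [pvSp, hc, hr]

theorem pvFilterErase (l : List String) (val : String) :
    (l.erase val).filter (· ≠ val) = l.filter (· ≠ val) := by
  induction l with
  | nil => rfl
  | cons a l ih =>
    by_cases ha : a = val
    · subst ha
      rw [List.erase_cons_head, List.filter_cons, if_neg (by simp)]
    · rw [List.erase_cons_tail (by simp [ha]), List.filter_cons, List.filter_cons, ih]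

-- the remove-until-absent loop removes every occurrence
theorem pvRemueve_eq_filter (lista : List String) (val : String) :
    remueve_valores_de_lista lista val = lista.filter (· ≠ val) := by
  by_cases hv : val ∈ lista
  · rw [remueve_valores_de_lista]
    rw [PySem.List.remove?_eq_some_erase lista val hv]
    simp only
    rw [pvRemueve_eq_filter (lista.erase val) val]
    exact pvFilterErase lista val
  · rw [remueve_valores_de_lista]
    rw [(PySem.List.remove?_eq_none_iff lista val).mpr hv]
    simp only
    rw [List.filter_eq_self.mpr]
    intro a ha
    simp only [ne_eq, decide_eq_true_eq]
    exact fun he => hv (he ▸ ha)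
termination_by lista.length
decreasing_by
  rw [List.length_erase_of_mem hv]
  exact Nat.pred_lt (by simpa using (List.length_pos_of_mem hv).ne')

theorem pvOfList_eq_empty_iff (w : List Char) : (String.ofList w = "") ↔ w = [] := by
  constructor
  · intro h; exact String.ofList_inj.mp h
  · intro h; simp [h]

theorem pvFilterMap (ws : List (List Char)) :
    (ws.map String.ofList).filter (· ≠ "") = (ws.filter (· ≠ [])).map String.ofList := by
  induction ws with
  | nil => rfl
  | cons w ws ih =>
    by_cases hw : w = []
    · subst hw; simpa using ih
    · have hne : String.ofList w ≠ "" := fun he => hw ((pvOfList_eq_empty_iff w).mp he)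
      rw [List.map_cons, List.filter_cons, List.filter_cons,
        if_pos (decide_eq_true hne), if_pos (decide_eq_true hw), List.map_cons, ih]

-- core invariant: B's fold produces exactly the nonempty pvSp-tokens of the mapped tail
theorem pvTok (cs : List Char) : ∀ (res : List String) (pal : List Char), ' ' ∉ pal →
    (if (cs.foldl pvStepB (res, pal)).2 ≠ [] then
       (cs.foldl pvStepB (res, pal)).1 ++ [String.ofList (cs.foldl pvStepB (res, pal)).2]
     else (cs.foldl pvStepB (res, pal)).1)
      = res ++ ((pvSp (pal ++ cs.map pvG)).filter (· ≠ [])).map String.ofList := by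
  induction cs with
  | nil =>
    intro res pal hpal
    rw [List.map_nil, List.append_nil, pvSp_no_space pal hpal]
    by_cases hp : pal = []
    · subst hp; simp
    · simp [List.foldl_nil, hp]
  | cons c cs ih =>
    intro res pal hpal
    simp only [List.foldl_cons, List.map_cons]
    by_cases hsep : pvParametro.contains c = true ∨ c = ' '
    · have hg : pvG c = ' ' := by
        unfold pvG
        rcases hsep with h | h
        · rw [if_pos h]
        · subst h
          by_cases hm : pvParametro.contains ' ' = true
          · rw [if_pos hm]
          · rw [if_neg hm]; decide
      have hstep : pvStepB (res, pal) c = (if pal ≠ [] then (res ++ [String.ofList pal], []) else (res, pal)) := by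
        unfold pvStepB
        rw [if_neg]
        simp only [pvIsIn_singleton, not_and_or, not_not]
        rcases hsep with h | h
        · exact Or.inl h
        · exact Or.inr (by simp [h])
      rw [hstep, hg]
      by_cases hp : pal = []
      · subst hp
        rw [if_neg (not_not_intro rfl)]
        rw [ih res [] (by simp)]
        simp [pvSp]
      · rw [if_pos hp]
        rw [ih (res ++ [String.ofList pal]) [] (by simp)]
        rw [List.nil_append, pvSp_append_space pal (cs.map pvG) hpal]
        simp [hp]
    · rw [not_or] at hsep
      obtain ⟨hnc, hns⟩ := hsep
      have hg : pvG c = PySem.Chars.upperChar c := by unfold pvG; rw [if_neg hnc]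
      have hstep : pvStepB (res, pal) c = (res, pal ++ [PySem.Chars.upperChar c]) := by
        unfold pvStepB
        rw [if_pos]
        · simp [PySem.Chars.upper]
        · exact ⟨by rw [pvIsIn_singleton]; exact hnc, hns⟩
      rw [hstep]
      have hpal' : ' ' ∉ pal ++ [PySem.Chars.upperChar c] := by
        intro hm
        rcases List.mem_append.mp hm with hm | hm
        · exact hpal hm
        · exact pvUpperChar_ne_space c hns (Eq.symm (by simpa using hm))
      rw [ih res (pal ++ [PySem.Chars.upperChar c]) hpal']
      rw [hg, show pal ++ PySem.Chars.upperChar c :: cs.map pvG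
            = (pal ++ [PySem.Chars.upperChar c]) ++ cs.map pvG by simp]

-- the two ports written without their let-bindings (definitional)
theorem pvA_eq (oracion : List String) : obtiene_lista_palabras_validas oracion
    = remueve_valores_de_lista
        ((PySem.Chars.splitOn
          (PySem.Chars.upper
            (oracion.foldl (fun t registro =>
              registro.toList.foldl (fun t c =>
                if ¬ PySem.Chars.isIn [c] pvParametro then t ++ [c] else t ++ [' ']) t) []))
          [' ']).map String.ofList) "" := rfl

theorem pvAlt_eq (oracion : List String) : obtiene_lista_palabras_validas_alt oracion
    = (if (oracion.foldl (fun st registro => registro.toList.foldl pvStepB st) ([], [])).2 ≠ [] then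
         (oracion.foldl (fun st registro => registro.toList.foldl pvStepB st) ([], [])).1
           ++ [String.ofList (oracion.foldl (fun st registro => registro.toList.foldl pvStepB st) ([], [])).2]
       else (oracion.foldl (fun st registro => registro.toList.foldl pvStepB st) ([], [])).1) := rfl

-- ===== VERDICT (by name: the statement is the Claim_ definition above) =====
theorem obtiene_lista_palabras_validas_spec : Claim_equal_obtiene_lista_palabras_validas := by
  intro oracion _
  unfold Spec_obtiene_lista_palabras_validas
  rw [pvA_eq, pvAlt_eq, pvFoldFlat, pvFoldFlat, pvAfold_map, List.nil_append]
  rw [show PySem.Chars.upper ((oracion.flatMap (·.toList)).map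
        (fun c => if pvParametro.contains c then ' ' else c))
      = (oracion.flatMap (·.toList)).map pvG by
    unfold PySem.Chars.upper
    rw [List.map_map]
    exact List.map_congr_left (fun c _ => pvG_comp c)]
  rw [pvSplitOn_eq_sp, pvRemueve_eq_filter, pvFilterMap]
  rw [pvTok (oracion.flatMap (·.toList)) [] [] (by simp)]
  simp
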